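-- pv_equiv track=rewrite | github.com/tchannagiri/DSBplot | utils/alignment_utils.py | count_variations
-- ===== SOURCE A (Python) =====
-- def count_variations(ref_align, read_align):
--   """
--     Return the number of insertions, deletions, and substitions in the alignment.
--
--     Parameters
--     ----------
--     ref_align  : the alignment string for the reference sequence.
--     read_align : the alignment string for the read sequence.
--
--     Returns
--     -------
--     A tuple (num_ins, num_del, num_subst) :
--       num_ins   : the number of insertions
--       num_del   : the number of deletions
--       num_subst : the number of substitutions
--   """
--   if len(ref_align) != len(read_align):
--     raise Exception("Alignment strings must be the same length")
--   num_ins = 0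
--   num_del = 0
--   num_subst = 0
--   for i in range(len(ref_align)):
--     if ref_align[i] != read_align[i]:
--       if ref_align[i] == '-':
--         num_ins += 1
--       elif read_align[i] == '-':
--         num_del += 1
--       else:
--         # both ref and read are nucleotides but not equal
--         num_subst += 1
--   return num_ins, num_del, num_subst
-- ===== SOURCE B (Python) =====
-- def count_variations(ref_align, read_align):
--   if len(ref_align) != len(read_align):
--     raise Exception("Alignment strings must be the same length")
--   # frequency table of aligned column pairs, then one aggregation pass per category
--   counts = {}
--   for pair in zip(ref_align, read_align):
--     counts[pair] = counts.get(pair, 0) + 1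
--   num_ins = sum(v for (r, q), v in counts.items() if r == '-' and q != '-')
--   num_del = sum(v for (r, q), v in counts.items() if q == '-' and r != '-')
--   num_subst = sum(v for (r, q), v in counts.items()
--                   if r != '-' and q != '-' and r != q)
--   return num_ins, num_del, num_subst
-- ===== Notes on version B (the rewrite author's own statement) =====
-- stated objective: alternative
-- what changed: B builds a frequency table of aligned column pairs in one pass over the zipped strings, then computes each of the three counts by aggregating over the distinct pairs of the table, instead of A's per-index branching with three running accumulators.
import Mathlib
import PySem

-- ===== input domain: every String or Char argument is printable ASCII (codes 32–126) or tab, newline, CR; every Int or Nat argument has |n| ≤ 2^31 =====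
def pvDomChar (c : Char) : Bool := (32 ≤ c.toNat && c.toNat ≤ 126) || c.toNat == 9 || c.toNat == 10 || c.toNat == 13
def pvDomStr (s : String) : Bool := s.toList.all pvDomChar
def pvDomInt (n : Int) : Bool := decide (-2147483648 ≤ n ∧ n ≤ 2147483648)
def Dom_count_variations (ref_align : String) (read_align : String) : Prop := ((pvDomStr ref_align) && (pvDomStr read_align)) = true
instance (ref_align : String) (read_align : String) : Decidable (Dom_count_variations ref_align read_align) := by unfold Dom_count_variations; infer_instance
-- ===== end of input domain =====

-- B builds a frequency table of aligned column pairs, then aggregates over the distinct pairs, instead of A's per-index branching; alternative structure, same cost.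


-- ===== PORT A =====
-- literal port of A: guard (raise outside Pre_), then one indexed loop with three accumulators
def count_variations (ref_align : String) (read_align : String) : Int × Int × Int :=
  if PySem.Str.len ref_align ≠ PySem.Str.len read_align then (0, 0, 0)  -- Python raises here; excluded by Pre_
  else
    (PySem.List.pyRange 0 (PySem.Str.len ref_align) 1).foldl
      (fun acc i =>
        match PySem.Str.pyGet? ref_align i, PySem.Str.pyGet? read_align i with
        | some r, some q =>
          if r ≠ q then
            if r = '-' then (acc.1 + 1, acc.2.1, acc.2.2)
            else if q = '-' then (acc.1, acc.2.1 + 1, acc.2.2)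
            else (acc.1, acc.2.1, acc.2.2 + 1)
          else acc
        | _, _ => acc)
      (0, 0, 0)

-- ===== PORT B =====
-- literal port of B: same guard, then counts[pair] = counts.get(pair,0)+1 over zip, then three sums over counts.items()
def count_variations_alt (ref_align : String) (read_align : String) : Int × Int × Int :=
  if PySem.Str.len ref_align ≠ PySem.Str.len read_align then (0, 0, 0)  -- Python raises here; excluded by Pre_
  else
    let counts :=
      (ref_align.toList.zip read_align.toList).foldl
        (fun d p => d.insert p (d.getD p 0 + 1)) PySem.Dict.empty
    let num_ins := ((counts.items.filter (fun p => p.1.1 == '-' && p.1.2 != '-')).map (·.2)).sum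
    let num_del := ((counts.items.filter (fun p => p.1.2 == '-' && p.1.1 != '-')).map (·.2)).sum
    let num_subst := ((counts.items.filter
        (fun p => p.1.1 != '-' && p.1.2 != '-' && p.1.1 != p.1.2)).map (·.2)).sum
    (num_ins, num_del, num_subst)

-- ===== PRECONDITION & SPEC =====
-- Pre_ excludes exactly the inputs where A raises Exception: alignment strings of different lengths.
def Pre_count_variations (ref_align : String) (read_align : String) : Prop :=
  ref_align.toList.length = read_align.toList.length
instance (ref_align : String) (read_align : String) : Decidable (Pre_count_variations ref_align read_align) := by unfold Pre_count_variations; infer_instance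
def pvWitness_count_variations : String × String := ("A-C-", "AACT")

def Spec_count_variations (ref_align : String) (read_align : String) (out : Int × Int × Int) : Prop := out = count_variations_alt ref_align read_align
instance (ref_align : String) (read_align : String) (out : Int × Int × Int) : Decidable (Spec_count_variations ref_align read_align out) := by unfold Spec_count_variations; infer_instance

-- ===== CLAIM (what is proved, stated in full; the proofs are below) =====
def Claim_equal_count_variations : Prop := ∀ (ref_align : String) (read_align : String), Dom_count_variations ref_align read_align → Pre_count_variations ref_align read_align → Spec_count_variations ref_align read_align (count_variations ref_align read_align)

-- ===== LEMMAS AND PROOFS =====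

-- sum over a nodup list of (if a == k then 1 else 0) is the membership indicator
lemma pv_sum_indicator {α : Type} [BEq α] [LawfulBEq α] (d : List α) (hnd : d.Nodup) (a : α) :
    (d.map (fun k => if a == k then (1 : Int) else 0)).sum = if d.contains a then 1 else 0 := by
  induction d with
  | nil => simp
  | cons k t ih =>
    rcases List.nodup_cons.mp hnd with ⟨hk, ht⟩
    rw [List.map_cons, List.sum_cons, ih ht]
    by_cases h : k = a
    · subst h
      simp [hk]
    · simp [Ne.symm h]

-- sum over a nodup list d of z.count k equals the count of elements of z lying in d
lemma pv_sum_count_eq {α : Type} [BEq α] [LawfulBEq α] (d : List α) (hnd : d.Nodup) (z : List α) :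
    (d.map (fun k => (z.count k : Int))).sum = (z.countP (fun a => d.contains a) : Int) := by
  induction z with
  | nil => simp
  | cons a z' ih =>
    have hcount : ∀ k : α, ((a :: z').count k : Int)
        = (z'.count k : Int) + (if a == k then (1 : Int) else 0) := by
      intro k
      rw [List.count_cons]
      push_cast
      split <;> simp
    have hsplit : (d.map (fun k => ((a :: z').count k : Int))).sum
        = (d.map (fun k => (z'.count k : Int))).sum
          + (d.map (fun k => if a == k then (1 : Int) else 0)).sum := by
      have := PySem.List.sum_map_add_int d (fun k => (z'.count k : Int))
        (fun k => if a == k then (1 : Int) else 0)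
      calc (d.map (fun k => ((a :: z').count k : Int))).sum
          = (d.map (fun k => (z'.count k : Int) + (if a == k then (1 : Int) else 0))).sum := by
            congr 1; exact List.map_congr_left (fun k _ => hcount k)
        _ = _ := this
    rw [hsplit, ih, pv_sum_indicator d hnd a, List.countP_cons]
    by_cases hm : d.contains a <;> simp [hm] <;> push_cast <;> ring

-- the three column-pair predicates
def pvPins (p : Char × Char) : Bool := p.1 == '-' && p.2 != '-'
def pvPdel (p : Char × Char) : Bool := p.2 == '-' && p.1 != '-'
def pvPsub (p : Char × Char) : Bool := p.1 != '-' && p.2 != '-' && p.1 != p.2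

-- B's sum for a predicate depending only on the key equals countP over the zipped list
lemma pv_b_sum (z : List (Char × Char)) (P : Char × Char → Bool) :
    (((PySem.Dict.counter z).items.filter (fun p => P p.1)).map (·.2)).sum
      = (z.countP P : Int) := by
  rw [PySem.Dict.items_counter]
  rw [List.filter_map, List.map_map]
  have hcomp : (fun p : (Char × Char) × Int => P p.1) ∘ (fun k => (k, (z.count k : Int)))
      = P := rfl
  rw [hcomp]
  have hnd : ((PySem.Set.ofList z).filter P).Nodup :=
    (PySem.Set.nodup_ofList z).filter P
  have hmap : List.map ((fun p : (Char × Char) × Int => p.2) ∘ fun k => (k, (z.count k : Int)))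
      ((PySem.Set.ofList z).filter P)
      = ((PySem.Set.ofList z).filter P).map (fun k => (z.count k : Int)) := rfl
  rw [hmap, pv_sum_count_eq ((PySem.Set.ofList z).filter P) hnd z]
  congr 1
  apply List.countP_congr
  intro a ha
  have : a ∈ (PySem.Set.ofList z).filter P ↔ P a = true := by
    simp [List.mem_filter, PySem.Set.mem_ofList, ha]
  by_cases hP : P a = true
  · simp [List.contains_iff_mem, this, hP]
  · simp [List.contains_iff_mem, this, hP]

-- A's fold over the zipped list, componentwise
lemma pv_a_fold (z : List (Char × Char)) (a b c : Int) :
    z.foldl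
      (fun acc p =>
        if p.1 ≠ p.2 then
          if p.1 = '-' then (acc.1 + 1, acc.2.1, acc.2.2)
          else if p.2 = '-' then (acc.1, acc.2.1 + 1, acc.2.2)
          else (acc.1, acc.2.1, acc.2.2 + 1)
        else acc) (a, b, c)
      = (a + (z.countP pvPins : Int), b + (z.countP pvPdel : Int), c + (z.countP pvPsub : Int)) := by
  induction z generalizing a b c with
  | nil => simp
  | cons p z' ih =>
    rcases p with ⟨r, q⟩
    rw [List.foldl_cons]
    rw [List.countP_cons, List.countP_cons, List.countP_cons]
    by_cases h1 : r = q
    · subst h1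
      simp only [ne_eq, not_true_eq_false, if_false, ite_self]
      rw [ih]
      simp [pvPins, pvPdel, pvPsub]
    · by_cases h2 : r = '-'
      · subst h2
        have hq : q ≠ '-' := fun hq => h1 hq.symm
        simp only [ne_eq, h1, not_false_iff, if_true, if_pos rfl]
        rw [ih]
        simp [pvPins, pvPdel, pvPsub, hq]
        ring
      · by_cases h3 : q = '-'
        · subst h3
          simp only [ne_eq, h1, not_false_iff, if_true, if_neg h2, if_pos rfl]
          rw [ih]
          simp [pvPins, pvPdel, pvPsub, h2]
          ring
        · simp only [ne_eq, h1, not_false_iff, if_true, if_neg h2, if_neg h3]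
          rw [ih]
          simp [pvPins, pvPdel, pvPsub, h2, h3, h1]
          ring

-- ===== VERDICT (by name: the statement is the Claim_ definition above) =====
theorem count_variations_spec : Claim_equal_count_variations := by
  intro ref_align read_align _hdom hpre
  have hpre2 : ref_align.toList.length = read_align.toList.length := hpre
  unfold Spec_count_variations count_variations count_variations_alt
  have hplen : ref_align.length = read_align.length := by
    rw [← String.length_toList, ← String.length_toList]; exact hpre2
  have hlen : PySem.Str.len ref_align = PySem.Str.len read_align := by
    simp [PySem.Str.len_eq, hpre2]
  rw [if_neg (by simp [PySem.Str.len_eq, hpre2]), if_neg (by simp [PySem.Str.len_eq, hpre2])]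
  set z := ref_align.toList.zip read_align.toList with hz
  have hzlen : z.length = ref_align.toList.length := by
    simp [hz, List.length_zip, hpre2]
  -- B side: the dict-building loop is Counter
  rw [PySem.Dict.foldl_insert_getD_add_one_eq_counter]
  -- A side: replace the indexed loop by a fold over z
  have hrange : PySem.Str.len ref_align = PySem.List.len z := by
    simp [PySem.Str.len_eq, PySem.List.len_eq, hzlen]
  rw [hrange]
  have hstep : (PySem.List.pyRange 0 (PySem.List.len z) 1).foldl
      (fun acc i =>
        match PySem.Str.pyGet? ref_align i, PySem.Str.pyGet? read_align i with
        | some r, some q =>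
          if r ≠ q then
            if r = '-' then (acc.1 + 1, acc.2.1, acc.2.2)
            else if q = '-' then (acc.1, acc.2.1 + 1, acc.2.2)
            else (acc.1, acc.2.1, acc.2.2 + 1)
          else acc
        | _, _ => acc) (((0 : Int), (0 : Int), (0 : Int)) : Int × Int × Int)
      = (PySem.List.pyRange 0 (PySem.List.len z) 1).foldl
        (fun acc i =>
          (fun (acc : Int × Int × Int) (p : Char × Char) =>
            if p.1 ≠ p.2 then
              if p.1 = '-' then (acc.1 + 1, acc.2.1, acc.2.2)
              else if p.2 = '-' then (acc.1, acc.2.1 + 1, acc.2.2)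
              else (acc.1, acc.2.1, acc.2.2 + 1)
            else acc) acc (PySem.List.pyGetD z i ('-', '-'))) ((0 : Int), (0 : Int), (0 : Int)) := by
    apply PySem.List.foldl_congr_mem
    intro acc i hi
    rcases (PySem.List.mem_pyRange_one).mp hi with ⟨h0, hlt⟩
    rw [PySem.List.len_eq] at hlt
    have hr : i < (ref_align.toList.length : Int) := by omega
    have hq : i < (read_align.toList.length : Int) := by omega
    have hgr : PySem.Str.pyGet? ref_align i = some ref_align.toList[i.toNat] := by
      rw [PySem.Str.pyGet?_eq]
      unfold PySem.Chars.pyGet?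
      rw [PySem.List.pyGet?_eq_some_getElem _ h0 hr]
    have hgq : PySem.Str.pyGet? read_align i = some read_align.toList[i.toNat] := by
      rw [PySem.Str.pyGet?_eq]
      unfold PySem.Chars.pyGet?
      rw [PySem.List.pyGet?_eq_some_getElem _ h0 hq]
    have hgd : PySem.List.pyGetD z i ('-', '-')
        = (ref_align.toList[i.toNat]'(by omega), read_align.toList[i.toNat]'(by omega)) := by
      rw [PySem.List.pyGetD_eq_getElem _ _ h0 hlt]
      simp [hz]
    rw [hgr, hgq, hgd]
  rw [hstep]
  have hfold := PySem.List.foldl_pyRange_pyGetD z ('-', '-')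
    (fun (acc : Int × Int × Int) (p : Char × Char) =>
      if p.1 ≠ p.2 then
        if p.1 = '-' then (acc.1 + 1, acc.2.1, acc.2.2)
        else if p.2 = '-' then (acc.1, acc.2.1 + 1, acc.2.2)
        else (acc.1, acc.2.1, acc.2.2 + 1)
      else acc) (((0 : Int), (0 : Int), (0 : Int)) : Int × Int × Int) (a := 0) le_rfl
  rw [hfold]
  simp only [Int.toNat_zero, List.drop_zero]
  rw [pv_a_fold]
  rw [show (fun p : (Char × Char) × Int => p.1.1 == '-' && p.1.2 != '-') = (fun p => pvPins p.1) from rfl,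
      show (fun p : (Char × Char) × Int => p.1.2 == '-' && p.1.1 != '-') = (fun p => pvPdel p.1) from rfl,
      show (fun p : (Char × Char) × Int => p.1.1 != '-' && p.1.2 != '-' && p.1.1 != p.1.2) = (fun p => pvPsub p.1) from rfl]
  rw [pv_b_sum z pvPins, pv_b_sum z pvPdel, pv_b_sum z pvPsub]
  simp
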